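-- pv_equiv track=rewrite | github.com/wgfajardom/portfolio | Challenges/09_number_of_atoms/code_number_of_atoms.py | third_count
-- ===== SOURCE A (Python) =====
-- def third_count(ind_elements, nam_elements, nmb_elements):
--
--     # Create result dictionary
--     dc_number_atoms = dict()
--
--     # Total number of atoms per element
--     for ii in range(len(ind_elements)):
--         key = nam_elements[ii]
--         if key not in dc_number_atoms.keys():
--             dc_number_atoms[key] = nmb_elements[ii]
--         else:
--             dc_number_atoms[key] = dc_number_atoms[key] + nmb_elements[ii]
--
--     # String-like output
--     output_formula = ""
--     ls_keys = sorted(list(dc_number_atoms.keys()))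
--     for key in ls_keys:
--         value = dc_number_atoms[key]
--         if value != 1:
--             output_formula = output_formula + key + str(value)
--         else:
--             output_formula = output_formula + key
--
--     return dc_number_atoms, output_formula
-- ===== SOURCE B (Python) =====
-- def third_count(ind_elements, nam_elements, nmb_elements):
--     # Sort the (name, count) pairs by name, then sum each consecutive run of
--     # equal names in a single scan, building the formula string in the same
--     # loop (runs arrive in sorted name order, so no separate key sort).
--     n = len(ind_elements)
--     pairs = sorted(zip(nam_elements[:n], nmb_elements[:n]), key=lambda p: p[0])
--     totals = {}
--     formula = ""
--     i = 0
--     m = len(pairs)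
--     while i < m:
--         name = pairs[i][0]
--         total = 0
--         while i < m and pairs[i][0] == name:
--             total += pairs[i][1]
--             i += 1
--         totals[name] = total
--         formula += name + (str(total) if total != 1 else "")
--     # the returned dict lists keys in first-appearance order (observable when
--     # callers iterate it); reassignment in a dict keeps the original position
--     dc_number_atoms = {name: totals[name] for name in nam_elements[:n]}
--     return dc_number_atoms, formula
-- ===== Notes on version B (the rewrite author's own statement) =====
-- stated objective: alternative
-- what changed: Replaces A's dict-accumulation pass followed by a key sort and per-key lookups with a sort-first algorithm: the (name,count) pairs are sorted by name, each consecutive run of equal names is summed in one scan that also emits the formula string run by run, and the returned dict is rebuilt in first-appearance key order.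
import Mathlib
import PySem

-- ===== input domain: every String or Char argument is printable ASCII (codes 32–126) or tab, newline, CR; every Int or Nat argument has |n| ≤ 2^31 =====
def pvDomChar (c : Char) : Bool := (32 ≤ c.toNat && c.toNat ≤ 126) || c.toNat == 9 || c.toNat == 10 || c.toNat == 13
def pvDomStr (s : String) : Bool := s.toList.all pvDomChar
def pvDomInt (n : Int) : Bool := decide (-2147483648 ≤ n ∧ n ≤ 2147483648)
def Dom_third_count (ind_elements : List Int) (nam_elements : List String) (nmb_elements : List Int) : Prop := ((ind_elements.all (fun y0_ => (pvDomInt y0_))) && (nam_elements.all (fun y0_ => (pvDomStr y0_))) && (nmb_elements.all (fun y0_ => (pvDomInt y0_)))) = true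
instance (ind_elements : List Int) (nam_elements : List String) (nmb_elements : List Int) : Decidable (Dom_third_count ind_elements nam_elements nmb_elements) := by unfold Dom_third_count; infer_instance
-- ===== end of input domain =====

-- B replaces A's dict-accumulation pass followed by a key sort by a different algorithm:
-- sort the (name, count) pairs by name first, then sum each consecutive run of equal names
-- in one scan, emitting the formula string run by run (runs arrive in sorted order, so no
-- key sort is needed); the returned dict is rebuilt in first-appearance key order, which is
-- the insertion order A's dict has (objective: alternative; equal cost).

-- ===== PORT A =====
def third_count (ind_elements : List Int) (nam_elements : List String) (nmb_elements : List Int) : (List (String × Int)) × String :=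
  -- for ii in range(len(ind_elements)): key = nam_elements[ii]; if key not in dc: dc[key] = nmb[ii] else dc[key] += nmb[ii]
  let dc := (PySem.List.pyRange 0 (PySem.List.len ind_elements) 1).foldl
    (fun d ii =>
      let key := PySem.List.pyGetD nam_elements ii ""
      if d.contains key = false then d.insert key (PySem.List.pyGetD nmb_elements ii 0)
      else d.insert key (d.getD key 0 + PySem.List.pyGetD nmb_elements ii 0))
    PySem.Dict.empty
  -- ls_keys = sorted(dc.keys()); for key in ls_keys: …
  let out := (PySem.List.sorted dc.keys (fun k => k) false).foldl
    (fun acc key =>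
      let value := dc.getD key 0
      if value ≠ 1 then acc ++ key.toList ++ PySem.Int.toChars value
      else acc ++ key.toList)
    ([] : List Char)
  (dc.items, String.ofList out)

-- ===== PORT B =====
-- inner while loop of Source B: consume the leading run of pairs whose name equals `name`,
-- accumulating the run total (the head pair's count is already in `acc`)
def pvTakeRun (name : String) : List (String × Int) → Int → Int × List (String × Int)
  | [], acc => (acc, [])
  | (nm, c) :: rest, acc =>
      if nm = name then pvTakeRun name rest (acc + c) else (acc, (nm, c) :: rest)

theorem pvTakeRun_snd_length_le (name : String) : ∀ (l : List (String × Int)) (acc : Int),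
    ((pvTakeRun name l acc).2).length ≤ l.length := by
  intro l
  induction l with
  | nil => intro acc; simp [pvTakeRun]
  | cons p rest ih =>
    intro acc
    obtain ⟨nm, c⟩ := p
    by_cases h : nm = name
    · simpa [pvTakeRun, h] using Nat.le_succ_of_le (ih (acc + c))
    · simp [pvTakeRun, h]

-- outer while loop of Source B over the sorted pairs: one iteration per run of equal names
def pvGroupScan : List (String × Int) → PySem.Dict String Int → List Char → (PySem.Dict String Int) × List Char
  | [], totals, fm => (totals, fm)
  | (name, c) :: rest, totals, fm =>
      let r := pvTakeRun name rest c
      pvGroupScan r.2 (totals.insert name r.1)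
        (fm ++ name.toList ++ (if r.1 ≠ 1 then PySem.Int.toChars r.1 else []))
  termination_by l _ _ => l.length
  decreasing_by exact Nat.lt_succ_of_le (pvTakeRun_snd_length_le name rest c)

def third_count_alt (ind_elements : List Int) (nam_elements : List String) (nmb_elements : List Int) : (List (String × Int)) × String :=
  -- pairs = sorted(zip(nam_elements[:n], nmb_elements[:n]), key=lambda p: p[0])
  let n := PySem.List.len ind_elements
  let pairs := PySem.List.sorted
    ((PySem.List.slice nam_elements none (some n)).zip (PySem.List.slice nmb_elements none (some n)))
    (fun p => p.1) false
  -- while i < m: … (totals, formula accumulated run by run)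
  let r := pvGroupScan pairs PySem.Dict.empty []
  -- dc = {name: totals[name] for name in nam_elements[:n]}; every such name is a key of
  -- totals, so `totals[name]` is ported exactly by getD with any default
  let dc := (PySem.List.slice nam_elements none (some n)).foldl
    (fun d nm => d.insert nm (r.1.getD nm 0)) PySem.Dict.empty
  (dc.items, String.ofList r.2)

-- ===== PRECONDITION & SPEC =====
-- A indexes nam_elements[ii] / nmb_elements[ii] for ii < len(ind_elements): Pre_ excludes exactly the
-- inputs where either list is shorter than ind_elements, on which A raises IndexError.
def Pre_third_count (ind_elements : List Int) (nam_elements : List String) (nmb_elements : List Int) : Prop :=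
  ind_elements.length ≤ nam_elements.length ∧ ind_elements.length ≤ nmb_elements.length
instance (ind_elements : List Int) (nam_elements : List String) (nmb_elements : List Int) : Decidable (Pre_third_count ind_elements nam_elements nmb_elements) := by unfold Pre_third_count; infer_instance
def pvWitness_third_count : List Int × List String × List Int := ([0, 1, 2], ["H", "O", "H"], [1, 2, 1])

def Spec_third_count (ind_elements : List Int) (nam_elements : List String) (nmb_elements : List Int) (out : (List (String × Int)) × String) : Prop := out = third_count_alt ind_elements nam_elements nmb_elements
instance (ind_elements : List Int) (nam_elements : List String) (nmb_elements : List Int) (out : (List (String × Int)) × String) : Decidable (Spec_third_count ind_elements nam_elements nmb_elements out) := by unfold Spec_third_count; infer_instance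

-- ===== CLAIM (what is proved, stated in full; the proofs are below) =====
def Claim_equal_third_count : Prop := ∀ (ind_elements : List Int) (nam_elements : List String) (nmb_elements : List Int), Dom_third_count ind_elements nam_elements nmb_elements → Pre_third_count ind_elements nam_elements nmb_elements → Spec_third_count ind_elements nam_elements nmb_elements (third_count ind_elements nam_elements nmb_elements)

-- ===== LEMMAS AND PROOFS =====

-- total count of key k in a pair list
def pvSumc (P : List (String × Int)) (k : String) : Int :=
  ((P.filter (fun p => p.1 == k)).map (fun p => p.2)).sum

-- the piece of the output string contributed by one key
def pvChunk (k : String) (v : Int) : List Char :=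
  k.toList ++ (if v ≠ 1 then PySem.Int.toChars v else [])

-- the distinct keys of a pair list, one per run, in the order the group scan visits them
def pvKeys : List (String × Int) → List String
  | [] => []
  | (name, _) :: rest => name :: pvKeys (rest.dropWhile (fun p => p.1 == name))
  termination_by l => l.length
  decreasing_by exact Nat.lt_succ_of_le (List.length_dropWhile_le _ _)

-- the index loop over range(len ind) reads exactly the first n zipped (name, count) pairs
theorem pv_fold_idx_eq_zip (G : PySem.Dict String Int → String → Int → PySem.Dict String Int)
    (nam : List String) (nmb : List Int) (n : Nat) (h1 : n ≤ nam.length) (h2 : n ≤ nmb.length)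
    (d : PySem.Dict String Int) :
    (PySem.List.pyRange 0 (n : Int) 1).foldl
      (fun d ii => G d (PySem.List.pyGetD nam ii "") (PySem.List.pyGetD nmb ii 0)) d
    = ((nam.zip nmb).take n).foldl (fun d p => G d p.1 p.2) d := by
  induction n generalizing d with
  | zero => simp [PySem.List.pyRange_one_eq_nil]
  | succ n ih =>
    have hn1 : n < nam.length := by omega
    have hn2 : n < nmb.length := by omega
    have hz : n < (nam.zip nmb).length := by simp [List.length_zip]; omega
    have hr : PySem.List.pyRange 0 ((n : Int) + 1) 1 = PySem.List.pyRange 0 (n : Int) 1 ++ [(n : Int)] :=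
      PySem.List.pyRange_one_succ_right (by positivity)
    have hcast : ((n + 1 : Nat) : Int) = (n : Int) + 1 := by push_cast; ring
    rw [hcast, hr, List.foldl_append, ih (by omega) (by omega)]
    have ht : (nam.zip nmb).take (n + 1) = (nam.zip nmb).take n ++ [(nam[n], nmb[n])] := by
      rw [List.take_add_one]
      simp [List.getElem?_eq_getElem hz, List.getElem_zip]
    rw [ht, List.foldl_append]
    simp [PySem.List.pyGetD_natCast, List.getElem?_eq_getElem hn1, List.getElem?_eq_getElem hn2]

-- A's membership branch and the accumulate step perform the same dictionary update
theorem pv_step_eq (d : PySem.Dict String Int) (k : String) (n : Int) :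
    (if d.contains k = false then d.insert k n else d.insert k (d.getD k 0 + n))
    = d.insert k (d.getD k 0 + n) := by
  by_cases h : d.contains k = false
  · simp [h, PySem.Dict.getD_of_not_contains d 0 h]
  · simp [h]

-- taking a prefix of a zip is the zip of the prefixes
theorem pv_take_zip (a : List String) (b : List Int) (n : Nat) :
    (a.zip b).take n = (a.take n).zip (b.take n) := by
  induction a generalizing b n with
  | nil => simp
  | cons x a ih =>
    cases b with
    | nil => simp
    | cons y b =>
      cases n with
      | zero => simp
      | succ n => simp [List.zip_cons_cons, ih]

-- accumulate-insert fold: each key ends at its running total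
theorem pv_getD_acc (P : List (String × Int)) (d : PySem.Dict String Int) (k : String) :
    (P.foldl (fun d p => d.insert p.1 (d.getD p.1 0 + p.2)) d).getD k 0
      = d.getD k 0 + pvSumc P k := by
  induction P generalizing d with
  | nil => simp [pvSumc]
  | cons p rest ih =>
    simp only [List.foldl_cons]
    rw [ih]
    by_cases h : p.1 = k
    · simp [pvSumc, h, PySem.Dict.getD_insert_self]
      ring
    · have hne : k ≠ p.1 := fun e => h e.symm
      rw [PySem.Dict.getD_insert_of_ne _ _ _ hne]
      simp [pvSumc, h]

-- constant-value insert fold over a key list: last (= every) write wins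
theorem pv_getD_const (names : List String) (T : String → Int) (d : PySem.Dict String Int) (k : String) :
    (names.foldl (fun d nm => d.insert nm (T nm)) d).getD k 0
      = if k ∈ names then T k else d.getD k 0 := by
  induction names generalizing d with
  | nil => simp
  | cons x rest ih =>
    simp only [List.foldl_cons]
    rw [ih]
    by_cases hr : k ∈ rest
    · simp [hr]
    · by_cases hx : k = x
      · simp [hx, PySem.Dict.getD_insert_self]
      · rw [PySem.Dict.getD_insert_of_ne _ _ _ hx]
        simp [hr, hx]

-- the inner while loop splits off exactly the leading run of `name`
theorem pv_takeRun_spec (name : String) : ∀ (l : List (String × Int)) (acc : Int),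
    pvTakeRun name l acc
      = (acc + ((l.takeWhile (fun p => p.1 == name)).map (fun p => p.2)).sum,
         l.dropWhile (fun p => p.1 == name)) := by
  intro l
  induction l with
  | nil => intro acc; simp [pvTakeRun]
  | cons p rest ih =>
    intro acc
    obtain ⟨nm, c⟩ := p
    by_cases h : nm = name
    · simp [pvTakeRun, h, ih]
      ring
    · simp [pvTakeRun, h]

-- after dropping the leading run of the minimal key, every remaining key is larger
theorem pv_dropWhile_gt (name : String) :
    ∀ (l : List (String × Int)), l.Pairwise (fun p q => p.1 ≤ q.1) →
    (∀ p ∈ l, name ≤ p.1) →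
    ∀ p ∈ l.dropWhile (fun p => p.1 == name), name < p.1 := by
  intro l
  induction l with
  | nil => simp
  | cons p rest ih =>
    intro hpw hall
    rw [List.pairwise_cons] at hpw
    by_cases h : p.1 = name
    · rw [List.dropWhile_cons_of_pos (by simp [h])]
      exact ih hpw.2 (fun q hq => hall q (List.mem_cons_of_mem _ hq))
    · rw [List.dropWhile_cons_of_neg (by simp [h])]
      intro q hq
      have hnp : name < p.1 :=
        lt_of_le_of_ne (hall p (List.mem_cons_self ..)) (fun e => h e.symm)
      rcases List.mem_cons.mp hq with rfl | hq
      · exact hnp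
      · exact lt_of_lt_of_le hnp (hpw.1 q hq)

-- one outer-loop step of the group scan, with the inner loop already summed up
theorem pv_groupScan_cons (name : String) (c : Int) (rest : List (String × Int))
    (totals : PySem.Dict String Int) (fm : List Char) :
    pvGroupScan ((name, c) :: rest) totals fm
      = pvGroupScan (rest.dropWhile (fun p => p.1 == name))
          (totals.insert name (c + ((rest.takeWhile (fun p => p.1 == name)).map (fun p => p.2)).sum))
          (fm ++ name.toList ++
            (if (c + ((rest.takeWhile (fun p => p.1 == name)).map (fun p => p.2)).sum) ≠ 1
             then PySem.Int.toChars (c + ((rest.takeWhile (fun p => p.1 == name)).map (fun p => p.2)).sum)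
             else [])) := by
  rw [pvGroupScan]
  simp only [pv_takeRun_spec]

theorem pv_pvKeys_cons (name : String) (c : Int) (rest : List (String × Int)) :
    pvKeys ((name, c) :: rest) = name :: pvKeys (rest.dropWhile (fun p => p.1 == name)) := by
  rw [pvKeys]

-- in a sorted run decomposition, the total for the head key is the head run's sum
theorem pv_sumc_head (name : String) (c : Int) (rest : List (String × Int))
    (hpw : ((name, c) :: rest).Pairwise (fun p q => p.1 ≤ q.1)) :
    pvSumc ((name, c) :: rest) name
      = c + ((rest.takeWhile (fun p => p.1 == name)).map (fun p => p.2)).sum := by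
  rw [List.pairwise_cons] at hpw
  have hrunfil : (rest.takeWhile (fun p => p.1 == name)).filter (fun p => p.1 == name)
      = rest.takeWhile (fun p => p.1 == name) :=
    List.filter_eq_self.mpr (fun x hx => List.mem_takeWhile_imp (p := fun q : String × Int => q.1 == name) hx)
  have hdropfil : (rest.dropWhile (fun p => p.1 == name)).filter (fun p => p.1 == name) = [] := by
    refine List.filter_eq_nil_iff.mpr (fun p hp h => ?_)
    have hlt := pv_dropWhile_gt name rest hpw.2 (fun q hq => hpw.1 q hq) p hp
    have hpn : p.1 = name := by simpa using h
    exact absurd hpn (ne_of_gt hlt)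
  have hfil : rest.filter (fun p => p.1 == name) = rest.takeWhile (fun p => p.1 == name) := by
    conv_lhs => rw [← List.takeWhile_append_dropWhile (p := fun p => p.1 == name) (l := rest)]
    rw [List.filter_append, hrunfil, hdropfil, List.append_nil]
  simp [pvSumc, hfil]

-- the total of a key absent from the head run and head pair is unchanged
theorem pv_sumc_rest (name : String) (c : Int) (rest : List (String × Int)) (k : String)
    (hk : k ≠ name) :
    pvSumc ((name, c) :: rest) k = pvSumc (rest.dropWhile (fun p => p.1 == name)) k := by
  have hrunfil : (rest.takeWhile (fun p => p.1 == name)).filter (fun p => p.1 == k) = [] := by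
    refine List.filter_eq_nil_iff.mpr (fun p hp h => ?_)
    have h1 : p.1 = name := by simpa using List.mem_takeWhile_imp hp
    have h2 : p.1 = k := by simpa using h
    exact hk (h2 ▸ h1)
  have hfil : rest.filter (fun p => p.1 == k)
      = (rest.dropWhile (fun p => p.1 == name)).filter (fun p => p.1 == k) := by
    conv_lhs => rw [← List.takeWhile_append_dropWhile (p := fun p => p.1 == name) (l := rest)]
    rw [List.filter_append, hrunfil, List.nil_append]
  simp [pvSumc, Ne.symm hk, hfil]

-- pvKeys of a key-sorted list holds exactly the keys
theorem pv_pvKeys_mem_aux (N : Nat) : ∀ (L : List (String × Int)), L.length ≤ N →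
    L.Pairwise (fun p q => p.1 ≤ q.1) →
    ∀ k, k ∈ pvKeys L ↔ k ∈ L.map (fun p => p.1) := by
  induction N with
  | zero =>
    intro L hL _ k
    rw [List.eq_nil_of_length_eq_zero (Nat.le_zero.mp hL)]
    simp [pvKeys]
  | succ N ih =>
    intro L hL hpw k
    cases L with
    | nil => simp [pvKeys]
    | cons p rest =>
      obtain ⟨name, c⟩ := p
      rw [List.pairwise_cons] at hpw
      have hd : (rest.dropWhile (fun p => p.1 == name)).Pairwise (fun p q => p.1 ≤ q.1) :=
        hpw.2.sublist (List.dropWhile_sublist _)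
      have hlen : (rest.dropWhile (fun p => p.1 == name)).length ≤ N := by
        have := List.length_dropWhile_le (fun p => p.1 == name) rest
        simp at hL; omega
      rw [pv_pvKeys_cons]
      have ihk := ih _ hlen hd k
      simp only [List.map_cons, List.mem_cons, ihk]
      constructor
      · rintro (rfl | hkr)
        · exact Or.inl rfl
        · refine Or.inr ?_
          have : k ∈ (rest.dropWhile (fun p => p.1 == name)).map (fun p => p.1) := hkr
          rcases List.mem_map.mp this with ⟨q, hq, rfl⟩
          exact List.mem_map.mpr ⟨q, (List.dropWhile_sublist _).mem hq, rfl⟩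
      · rintro (rfl | hkr)
        · exact Or.inl rfl
        · rcases List.mem_map.mp hkr with ⟨q, hq, rfl⟩
          conv at hq => rw [← List.takeWhile_append_dropWhile (p := fun p => p.1 == name) (l := rest)]
          rcases List.mem_append.mp hq with hq | hq
          · exact Or.inl (by simpa using List.mem_takeWhile_imp hq)
          · exact Or.inr (List.mem_map.mpr ⟨q, hq, rfl⟩)

theorem pv_pvKeys_mem (L : List (String × Int)) (h : L.Pairwise (fun p q => p.1 ≤ q.1)) (k : String) :
    k ∈ pvKeys L ↔ k ∈ L.map (fun p => p.1) :=
  pv_pvKeys_mem_aux L.length L le_rfl h k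

-- pvKeys of a key-sorted list is strictly increasing
theorem pv_pvKeys_pairwise_aux (N : Nat) : ∀ (L : List (String × Int)), L.length ≤ N →
    L.Pairwise (fun p q => p.1 ≤ q.1) →
    (pvKeys L).Pairwise (· < ·) := by
  induction N with
  | zero =>
    intro L hL _
    rw [List.eq_nil_of_length_eq_zero (Nat.le_zero.mp hL)]
    simp [pvKeys]
  | succ N ih =>
    intro L hL hpw
    cases L with
    | nil => simp [pvKeys]
    | cons p rest =>
      obtain ⟨name, c⟩ := p
      have hpw' := hpw
      rw [List.pairwise_cons] at hpw
      have hd : (rest.dropWhile (fun p => p.1 == name)).Pairwise (fun p q => p.1 ≤ q.1) :=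
        hpw.2.sublist (List.dropWhile_sublist _)
      have hlen : (rest.dropWhile (fun p => p.1 == name)).length ≤ N := by
        have := List.length_dropWhile_le (fun p => p.1 == name) rest
        simp at hL; omega
      rw [pv_pvKeys_cons, List.pairwise_cons]
      refine ⟨fun k hk => ?_, ih _ hlen hd⟩
      rcases List.mem_map.mp ((pv_pvKeys_mem_aux N _ hlen hd k).mp hk) with ⟨q, hq, rfl⟩
      exact pv_dropWhile_gt name rest hpw.2 (fun r hr => hpw.1 r hr) q hq

theorem pv_pvKeys_pairwise (L : List (String × Int)) (h : L.Pairwise (fun p q => p.1 ≤ q.1)) :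
    (pvKeys L).Pairwise (· < ·) :=
  pv_pvKeys_pairwise_aux L.length L le_rfl h

-- group scan over a key-sorted list = one insert + one chunk per distinct key
theorem pv_groupScan_spec_aux (N : Nat) : ∀ (L : List (String × Int)), L.length ≤ N →
    ∀ (totals : PySem.Dict String Int) (fm : List Char),
    L.Pairwise (fun p q => p.1 ≤ q.1) →
    pvGroupScan L totals fm
      = ((pvKeys L).foldl (fun d k => d.insert k (pvSumc L k)) totals,
         fm ++ (pvKeys L).flatMap (fun k => pvChunk k (pvSumc L k))) := by
  induction N with
  | zero =>
    intro L hL totals fm _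
    rw [List.eq_nil_of_length_eq_zero (Nat.le_zero.mp hL)]
    simp [pvGroupScan, pvKeys]
  | succ N ih =>
    intro L hL totals fm hpw
    cases L with
    | nil => simp [pvGroupScan, pvKeys]
    | cons p rest =>
      obtain ⟨name, c⟩ := p
      have hpw' := hpw
      rw [List.pairwise_cons] at hpw
      have hd : (rest.dropWhile (fun p => p.1 == name)).Pairwise (fun p q => p.1 ≤ q.1) :=
        hpw.2.sublist (List.dropWhile_sublist _)
      have hlen : (rest.dropWhile (fun p => p.1 == name)).length ≤ N := by
        have := List.length_dropWhile_le (fun p => p.1 == name) rest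
        simp at hL; omega
      have hS : pvSumc ((name, c) :: rest) name
          = c + ((rest.takeWhile (fun p => p.1 == name)).map (fun p => p.2)).sum :=
        pv_sumc_head name c rest hpw'
      have hne : ∀ k ∈ pvKeys (rest.dropWhile (fun p => p.1 == name)), k ≠ name := by
        intro k hk
        rcases List.mem_map.mp ((pv_pvKeys_mem_aux N _ hlen hd k).mp hk) with ⟨q, hq, rfl⟩
        exact ne_of_gt (pv_dropWhile_gt name rest hpw.2 (fun r hr => hpw.1 r hr) q hq)
      have hsum : ∀ k ∈ pvKeys (rest.dropWhile (fun p => p.1 == name)),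
          pvSumc (rest.dropWhile (fun p => p.1 == name)) k = pvSumc ((name, c) :: rest) k := by
        intro k hk
        exact (pv_sumc_rest name c rest k (hne k hk)).symm
      rw [pv_groupScan_cons, ih _ hlen _ _ hd, pv_pvKeys_cons]
      simp only [List.foldl_cons, List.flatMap_cons, Prod.mk.injEq]
      constructor
      · rw [hS]
        exact PySem.List.foldl_congr_mem _ _ _ _ (fun d k hk => by rw [hsum k hk])
      · rw [List.flatMap_congr (fun k hk => by rw [hsum k hk]), hS]
        simp [pvChunk, List.append_assoc]

theorem pv_groupScan_spec (L : List (String × Int)) (totals : PySem.Dict String Int) (fm : List Char)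
    (h : L.Pairwise (fun p q => p.1 ≤ q.1)) :
    pvGroupScan L totals fm
      = ((pvKeys L).foldl (fun d k => d.insert k (pvSumc L k)) totals,
         fm ++ (pvKeys L).flatMap (fun k => pvChunk k (pvSumc L k))) :=
  pv_groupScan_spec_aux L.length L le_rfl totals fm h


theorem third_count_eq (ind_elements : List Int) (nam_elements : List String) (nmb_elements : List Int)
    (hpre : Pre_third_count ind_elements nam_elements nmb_elements) :
    third_count ind_elements nam_elements nmb_elements = third_count_alt ind_elements nam_elements nmb_elements := by
  obtain ⟨h1, h2⟩ := hpre
  unfold third_count third_count_alt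
  have hslice1 : PySem.List.slice nam_elements none (some (PySem.List.len ind_elements))
      = nam_elements.take ind_elements.length := by
    rw [PySem.List.len_eq, PySem.List.slice_to_natCast]
  have hslice2 : PySem.List.slice nmb_elements none (some (PySem.List.len ind_elements))
      = nmb_elements.take ind_elements.length := by
    rw [PySem.List.len_eq, PySem.List.slice_to_natCast]
  have hdict :
      (PySem.List.pyRange 0 (PySem.List.len ind_elements) 1).foldl
        (fun d ii =>
          let key := PySem.List.pyGetD nam_elements ii ""
          if d.contains key = false then d.insert key (PySem.List.pyGetD nmb_elements ii 0)
          else d.insert key (d.getD key 0 + PySem.List.pyGetD nmb_elements ii 0))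
        PySem.Dict.empty
      = ((nam_elements.take ind_elements.length).zip (nmb_elements.take ind_elements.length)).foldl
          (fun d p => d.insert p.1 (d.getD p.1 0 + p.2)) PySem.Dict.empty := by
    rw [PySem.List.len_eq,
      PySem.List.foldl_congr_mem _ _
        (fun d ii => PySem.Dict.insert d (PySem.List.pyGetD nam_elements ii "")
          (d.getD (PySem.List.pyGetD nam_elements ii "") 0 + PySem.List.pyGetD nmb_elements ii 0)) _
        (by intro d ii _; exact pv_step_eq d _ _)]
    rw [pv_fold_idx_eq_zip (fun d k n => d.insert k (d.getD k 0 + n)) nam_elements nmb_elements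
      ind_elements.length h1 h2]
    rw [pv_take_zip]
  simp only [hslice1, hslice2, hdict]
  set names := nam_elements.take ind_elements.length with hnames
  set cnts := nmb_elements.take ind_elements.length with hcnts
  set P := names.zip cnts with hP
  set L := PySem.List.sorted P (fun p => p.1) false with hL
  set dA := P.foldl (fun (d : PySem.Dict String Int) (p : String × Int) => d.insert p.1 (d.getD p.1 0 + p.2)) PySem.Dict.empty with hdA
  have hlen_names : names.length = ind_elements.length := by
    simp [hnames, h1]
  have hlen_cnts : cnts.length = ind_elements.length := by
    simp [hcnts, h2]
  have hmapfst : P.map (fun p => p.1) = names := by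
    rw [hP]
    exact List.map_fst_zip (by rw [hlen_names, hlen_cnts])
  have hLpw : L.Pairwise (fun p q => p.1 ≤ q.1) := PySem.List.sorted_pairwise P (fun p => p.1)
  have hperm : L.Perm P := PySem.List.sorted_perm P (fun p => p.1) false
  have hsumLP : ∀ k, pvSumc L k = pvSumc P k := fun k =>
    List.Perm.sum_eq ((hperm.filter _).map _)
  have hmemL : ∀ k, k ∈ L.map (fun p => p.1) ↔ k ∈ names := by
    intro k
    rw [← hmapfst]
    exact (hperm.map _).mem_iff
  have hkA : dA.keys = PySem.Set.ofList names := by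
    rw [hdA, PySem.Dict.keys_foldl_insert_key, hmapfst, PySem.Dict.keys_empty]
    rfl
  have hndA : dA.keys.Nodup := by
    rw [hdA]
    exact PySem.Dict.nodup_keys_foldl_insert_key _ (fun (p : String × Int) => p.1)
      (fun (d : PySem.Dict String Int) (p : String × Int) => d.getD p.1 0 + p.2) _
      PySem.Dict.nodup_keys_empty
  have hgA : ∀ k, dA.getD k 0 = pvSumc P k := by
    intro k
    rw [hdA, pv_getD_acc]
    simp
  have hmemNames : ∀ k, k ∈ PySem.Set.ofList names ↔ k ∈ names := by
    intro k
    have := PySem.List.mem_dedup names k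
    rwa [PySem.List.dedup_eq_ofList] at this
  rw [pv_groupScan_spec L PySem.Dict.empty [] hLpw]
  set totals := (pvKeys L).foldl (fun (d : PySem.Dict String Int) k => d.insert k (pvSumc L k)) PySem.Dict.empty with htotals
  have htot : ∀ k, totals.getD k 0 = if k ∈ pvKeys L then pvSumc L k else 0 := by
    intro k
    rw [htotals, pv_getD_const]
    simp
  have hdc_congr : names.foldl (fun (d : PySem.Dict String Int) nm => d.insert nm (totals.getD nm 0)) PySem.Dict.empty
      = names.foldl (fun (d : PySem.Dict String Int) nm => d.insert nm (pvSumc P nm)) PySem.Dict.empty := by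
    refine PySem.List.foldl_congr_mem _ _ _ _ (fun d nm hnm => ?_)
    have hk : nm ∈ pvKeys L := (pv_pvKeys_mem L hLpw nm).mpr ((hmemL nm).mpr hnm)
    rw [htot nm, if_pos hk, hsumLP]
  set dC := names.foldl (fun (d : PySem.Dict String Int) nm => d.insert nm (pvSumc P nm)) PySem.Dict.empty with hdC
  have hkC : dC.keys = PySem.Set.ofList names := by
    rw [hdC, PySem.Dict.keys_foldl_insert, PySem.Dict.keys_empty]
    rfl
  have hndC : dC.keys.Nodup := by
    rw [hdC]
    exact PySem.Dict.nodup_keys_foldl_insert _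
      (fun (d : PySem.Dict String Int) nm => pvSumc P nm) _ PySem.Dict.nodup_keys_empty
  have hgC : ∀ k, dC.getD k 0 = if k ∈ names then pvSumc P k else 0 := by
    intro k
    rw [hdC, pv_getD_const]
    simp
  have hitems : dA.items = dC.items := by
    rw [PySem.Dict.items_eq_map_keys dA hndA 0, PySem.Dict.items_eq_map_keys dC hndC 0, hkA, hkC]
    refine List.map_congr_left (fun k hk => ?_)
    have hkn : k ∈ names := (hmemNames k).mp hk
    rw [hgA, hgC, if_pos hkn]
  have hSpw : (PySem.List.sorted dA.keys (fun k => k) false).Pairwise (· ≤ ·) :=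
    PySem.List.sorted_pairwise dA.keys (fun k => k)
  have hKpw : (pvKeys L).Pairwise (· ≤ ·) := (pv_pvKeys_pairwise L hLpw).imp le_of_lt
  have hndS : (PySem.List.sorted dA.keys (fun k => k) false).Nodup :=
    (PySem.List.sorted_perm dA.keys _ false).nodup_iff.mpr hndA
  have hndK : (pvKeys L).Nodup :=
    List.Pairwise.imp (fun h => ne_of_lt h) (pv_pvKeys_pairwise L hLpw)
  have hSeq : PySem.List.sorted dA.keys (fun k => k) false = pvKeys L := by
    refine PySem.List.eq_of_perm_of_pairwise_le
      ((List.perm_ext_iff_of_nodup hndS hndK).mpr (fun k => ?_)) hSpw hKpw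
    rw [pv_pvKeys_mem L hLpw k, hmemL k]
    rw [(PySem.List.sorted_perm dA.keys (fun k => k) false).mem_iff, hkA]
    exact hmemNames k
  have hstr : (PySem.List.sorted dA.keys (fun k => k) false).foldl
      (fun acc key =>
        if dA.getD key 0 ≠ 1 then acc ++ key.toList ++ PySem.Int.toChars (dA.getD key 0)
        else acc ++ key.toList) []
      = (pvKeys L).flatMap (fun k => pvChunk k (pvSumc L k)) := by
    rw [PySem.List.foldl_congr_mem _ _ (fun acc k => acc ++ pvChunk k (dA.getD k 0)) _
      (fun acc k _ => by by_cases hv : dA.getD k 0 = 1 <;> simp [pvChunk, hv, List.append_assoc])]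
    rw [PySem.List.foldl_append_eq_flatMap, List.nil_append, hSeq]
    exact List.flatMap_congr (fun k _ => by rw [hgA, hsumLP])
  simp only [hdc_congr]
  exact Prod.ext hitems (congrArg String.ofList hstr)

-- ===== VERDICT (by name: the statement is the Claim_ definition above) =====
theorem third_count_spec : Claim_equal_third_count := by
  intro ind nam nmb _ hpre
  unfold Spec_third_count
  exact third_count_eq ind nam nmb hpre
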